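-- pv_equiv track=rewrite | github.com/robert-lamprecht/Tmaze-toolkit | tmaze_toolkit/processing/robust_trial_detection.py | find_trial_events
-- ===== SOURCE A (Python) =====
-- def find_trial_events(trace1, trace2, window_frames=15):
--     """
--     Find distinct trial events when two doors move concurrently.
--
--     Args:
--         trace1 (list): First door trace (binary 0/1 values)
--         trace2 (list): Second door trace (binary 0/1 values)
--         window_frames (int): Window size to check for concurrent movement
--
--     Returns:
--         List of frame indices where distinct events start
--     """
--     events = []  # Store frame numbers where events start
--     i = 0  # Initialize frame counter
--     is_moving = False  # Track if we're currently in a concurrent movement period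
--
--     # Loop through the traces, stopping window_frames before the end to prevent overflow
--     while i < len(trace1) - window_frames:
--         # Get a slice of frames to check for concurrent movement
--         window1 = trace1[i:i+window_frames]  # Window for first door
--         window2 = trace2[i:i+window_frames]  # Window for second door
--
--         # Check if both doors show any movement (1's) in their windows
--         concurrent_movement = (1 in window1 and 1 in window2)
--
--         if concurrent_movement and not is_moving:
--             # Start of a new concurrent movement event
--             events.append(i)
--             is_moving = True
--             i += 1  # Move to next frame to continue checking
--         elif not concurrent_movement and is_moving:
--             # End of concurrent movement period
--             is_moving = False
--             i += 1
--         else: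
--             # Either continuing current state or no movement
--             i += 1
--
--     return events  # FIXED: Added missing return statement
-- ===== SOURCE B (Python) =====
-- def find_trial_events(trace1, trace2, window_frames=15):
--     n1, n2 = len(trace1), len(trace2)
--     limit = n1 - window_frames
--     if window_frames <= 0 or limit <= 0:
--         return []
--     # prefix counts of frames equal to 1
--     p1 = [0]
--     c = 0
--     for v in trace1:
--         c += 1 if v == 1 else 0
--         p1.append(c)
--     p2 = [0]
--     c = 0
--     for v in trace2:
--         c += 1 if v == 1 else 0
--         p2.append(c)
--     events = []
--     prev = False
--     for i in range(limit):
--         cur = (p1[i + window_frames] - p1[i] > 0) and \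
--               (p2[min(i + window_frames, n2)] - p2[min(i, n2)] > 0)
--         if cur and not prev:
--             events.append(i)
--         prev = cur
--     return events
-- ===== Notes on version B (the rewrite author's own statement) =====
-- stated objective: faster
-- what changed: Replaced A's per-position window slicing with two '1 in window' scans (O(w) work per step) by precomputed prefix counts of 1-frames, so each position's concurrent-movement test is two O(1) subtractions in a single pass.
-- outside the precondition, e.g. on find_trial_events([1, 0, 1], [1, 1], -1): A returns [0], B returns []
import Mathlib
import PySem

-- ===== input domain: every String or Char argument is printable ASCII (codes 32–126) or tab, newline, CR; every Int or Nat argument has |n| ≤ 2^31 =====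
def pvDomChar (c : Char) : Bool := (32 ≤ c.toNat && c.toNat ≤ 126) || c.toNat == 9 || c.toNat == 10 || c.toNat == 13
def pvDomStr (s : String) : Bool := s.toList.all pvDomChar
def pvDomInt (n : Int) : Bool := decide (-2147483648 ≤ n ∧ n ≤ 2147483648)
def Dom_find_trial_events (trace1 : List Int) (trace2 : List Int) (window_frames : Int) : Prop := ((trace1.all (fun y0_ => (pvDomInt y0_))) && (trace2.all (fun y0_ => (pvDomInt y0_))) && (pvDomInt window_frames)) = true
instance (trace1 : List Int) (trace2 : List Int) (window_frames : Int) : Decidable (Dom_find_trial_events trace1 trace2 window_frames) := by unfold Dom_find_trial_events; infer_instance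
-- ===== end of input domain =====

-- B replaces A's per-step window slices and membership scans by prefix counts of 1-frames
-- queried in O(1) per position (objective: faster; a timing run measures the speed-up).

-- ===== PORT A =====
-- A's while-loop: state (i, is_moving, events); steps by 1 while i < len(trace1) - window_frames
-- fuel = the exact number of remaining iterations ((len(trace1) - window_frames - i).toNat at
-- the initial call), so the structural recursion runs precisely while i < len(trace1) - window_frames
def pvLoopA (t1 t2 : List Int) (w : Int) : Nat → Int → Bool → List Int → List Int
  | 0, _, _, events => events
  | fuel + 1, i, moving, events =>
    if i < (t1.length : Int) - w then
      let window1 := PySem.List.slice t1 (some i) (some (i + w))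
      let window2 := PySem.List.slice t2 (some i) (some (i + w))
      let concurrent := window1.contains 1 && window2.contains 1
      if concurrent && !moving then
        pvLoopA t1 t2 w fuel (i + 1) true (events ++ [i])
      else if !concurrent && moving then
        pvLoopA t1 t2 w fuel (i + 1) false events
      else
        pvLoopA t1 t2 w fuel (i + 1) moving events
    else events

def find_trial_events (trace1 : List Int) (trace2 : List Int) (window_frames : Int) : List Int :=
  pvLoopA trace1 trace2 window_frames ((trace1.length : Int) - window_frames).toNat 0 false []

-- ===== PORT B =====
-- prefix counts: pvPrefix t = [0, #1's in t[:1], #1's in t[:2], …]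
def pvPrefix (t : List Int) : List Int :=
  (t.foldl (fun (st : List Int × Int) v =>
      let c := st.2 + (if v = 1 then 1 else 0)
      (st.1 ++ [c], c)) ([0], 0)).1

def find_trial_events_alt (trace1 : List Int) (trace2 : List Int) (window_frames : Int) : List Int :=
  let n1 : Int := trace1.length
  let n2 : Int := trace2.length
  let limit := n1 - window_frames
  if window_frames ≤ 0 || limit ≤ 0 then []
  else
    let p1 := pvPrefix trace1
    let p2 := pvPrefix trace2
    ((PySem.List.pyRange 0 limit 1).foldl
      (fun (st : List Int × Bool) i =>
        let cur := decide (p1.getD (i + window_frames).toNat 0 - p1.getD i.toNat 0 > 0)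
                && decide (p2.getD (min (i + window_frames) n2).toNat 0
                            - p2.getD (min i n2).toNat 0 > 0)
        ((if cur && !st.2 then st.1 ++ [i] else st.1), cur))
      ([], false)).1

-- ===== PRECONDITION & SPEC =====
-- Pre_ restricts to nonnegative window sizes, the natural domain of a window parameter; for
-- window_frames < 0 Python's negative-slice wraparound makes A's result an implementation artefact.
def Pre_find_trial_events (trace1 : List Int) (trace2 : List Int) (window_frames : Int) : Prop :=
  0 ≤ window_frames
instance (trace1 : List Int) (trace2 : List Int) (window_frames : Int) : Decidable (Pre_find_trial_events trace1 trace2 window_frames) := by unfold Pre_find_trial_events; infer_instance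
def pvWitness_find_trial_events : List Int × List Int × Int := ([1, 0, 0, 1, 0], [0, 1, 0, 1], 2)

def Spec_find_trial_events (trace1 : List Int) (trace2 : List Int) (window_frames : Int) (out : List Int) : Prop := out = find_trial_events_alt trace1 trace2 window_frames
instance (trace1 : List Int) (trace2 : List Int) (window_frames : Int) (out : List Int) : Decidable (Spec_find_trial_events trace1 trace2 window_frames out) := by unfold Spec_find_trial_events; infer_instance

-- ===== CLAIM (what is proved, stated in full; the proofs are below) =====
def Claim_equal_find_trial_events : Prop := ∀ (trace1 : List Int) (trace2 : List Int) (window_frames : Int), Dom_find_trial_events trace1 trace2 window_frames → Pre_find_trial_events trace1 trace2 window_frames → Spec_find_trial_events trace1 trace2 window_frames (find_trial_events trace1 trace2 window_frames)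

-- ===== LEMMAS AND PROOFS =====

-- number of 1-frames among the first k entries of t
def onesBelow (t : List Int) (k : Nat) : Int :=
  ((t.take k).countP (fun x => x == 1) : Int)

theorem countP_take_sub (t : List Int) (a b : Nat) (hab : a ≤ b) :
    (((t.drop a).take (b - a)).countP (fun x => x == 1) : Int) = onesBelow t b - onesBelow t a := by
  have h : t.take b = t.take a ++ (t.drop a).take (b - a) := by
    conv_lhs => rw [show b = a + (b - a) from by omega]
    rw [List.take_add]
  simp [onesBelow, h, List.countP_append]

theorem onesBelow_min (t : List Int) (b : Nat) : onesBelow t (min b t.length) = onesBelow t b := by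
  rcases le_total b t.length with h | h
  · simp [min_eq_left h]
  · simp [onesBelow, min_eq_right h, List.take_of_length_le, h]

theorem onesBelow_cons (v : Int) (rest : List Int) (k : Nat) :
    onesBelow (v :: rest) (k + 1) = (if v = 1 then 1 else 0) + onesBelow rest k := by
  simp only [onesBelow, List.take_succ_cons, List.countP_cons]
  by_cases hv : v = 1 <;> simp [hv] <;> push_cast <;> ring

theorem pvContains_countP (l : List Int) :
    l.contains 1 = decide (0 < l.countP (fun x => x == 1)) := by
  by_cases hm : (1 : Int) ∈ l
  · have h1 : l.contains 1 = true := by simpa [List.contains_iff_mem]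
    have h2 : 0 < l.countP (fun x => x == 1) := List.countP_pos_iff.mpr ⟨1, hm, by simp⟩
    rw [h1]
    exact (decide_eq_true h2).symm
  · have h1 : l.contains 1 = false := by simpa [List.contains_iff_mem]
    have h2 : ¬ (0 < l.countP (fun x => x == 1)) := by
      intro h
      obtain ⟨a, ha, hp⟩ := List.countP_pos_iff.mp h
      have : a = 1 := by simpa using hp
      exact hm (this ▸ ha)
    rw [h1]
    exact (decide_eq_false h2).symm

theorem pvPrefix_aux (t : List Int) : ∀ (acc : List Int) (c : Int),
    (t.foldl (fun (st : List Int × Int) v =>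
        let c := st.2 + (if v = 1 then 1 else 0)
        (st.1 ++ [c], c)) (acc, c)).1
      = acc ++ (List.range t.length).map (fun k => c + onesBelow t (k + 1)) := by
  induction t with
  | nil => intro acc c; simp
  | cons v rest ih =>
    intro acc c
    simp only [List.foldl_cons]
    rw [ih]
    rw [List.length_cons, List.range_succ_eq_map, List.map_cons, List.map_map]
    simp only [List.append_assoc, List.singleton_append]
    congr 1
    congr 1
    · have := onesBelow_cons v rest 0
      simp only [onesBelow, List.take_zero, List.countP_nil] at this ⊢
      simp [this]
    · apply List.map_congr_left
      intro k _
      simp only [Function.comp]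
      rw [onesBelow_cons]
      ring

theorem pvPrefix_getD (t : List Int) (k : Nat) (hk : k ≤ t.length) :
    (pvPrefix t).getD k 0 = onesBelow t k := by
  unfold pvPrefix
  rw [pvPrefix_aux]
  cases k with
  | zero => simp [onesBelow]
  | succ j =>
    have hj : j < t.length := by omega
    simp only [List.singleton_append, List.getD_cons_succ]
    rw [List.getD_eq_getElem _ _ (by simpa using hj)]
    simp [hj, onesBelow]

theorem contains_eq_prefix (t : List Int) (i w : Int) (hi : 0 ≤ i) (hw : 0 ≤ w) :
    (PySem.List.slice t (some i) (some (i + w))).contains 1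
      = decide ((pvPrefix t).getD (min (i + w) (t.length : Int)).toNat 0
                 - (pvPrefix t).getD (min i (t.length : Int)).toNat 0 > 0) := by
  rw [PySem.List.slice_toNat t hi (by omega)]
  rw [pvContains_countP]
  rw [pvPrefix_getD t _ (by omega), pvPrefix_getD t _ (by omega)]
  rw [show (min (i + w) (t.length : Int)).toNat = min (i + w).toNat t.length from by omega]
  rw [show (min i (t.length : Int)).toNat = min i.toNat t.length from by omega]
  rw [onesBelow_min, onesBelow_min]
  rw [decide_eq_decide]
  rw [← countP_take_sub t i.toNat (i + w).toNat (by omega)]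
  exact Int.natCast_pos.symm

theorem contains_eq_prefix' (t : List Int) (i w : Int) (hi : 0 ≤ i) (hw : 0 ≤ w)
    (hb : i + w ≤ (t.length : Int)) :
    (PySem.List.slice t (some i) (some (i + w))).contains 1
      = decide ((pvPrefix t).getD (i + w).toNat 0 - (pvPrefix t).getD i.toNat 0 > 0) := by
  rw [contains_eq_prefix t i w hi hw]
  rw [show min (i + w) (t.length : Int) = i + w from by omega]
  rw [show min i (t.length : Int) = i from by omega]

-- A's loop with a nonpositive window sees only empty windows, so its state never changes
theorem loopA_empty_window (t1 t2 : List Int) : ∀ (fuel : Nat) (i : Int) (ev : List Int),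
    0 ≤ i →
    pvLoopA t1 t2 0 fuel i false ev = ev := by
  intro fuel
  induction fuel with
  | zero =>
    intro i ev hi
    rfl
  | succ n ihn =>
    intro i ev hi
    by_cases hlt : i < (t1.length : Int) - 0
    · rw [pvLoopA, if_pos hlt]
      have e1 : PySem.List.slice t1 (some i) (some (i + 0)) = ([] : List Int) := by
        rw [PySem.List.slice_toNat t1 hi (by omega)]
        rw [show (i + 0).toNat - i.toNat = 0 from by omega]
        simp
      have e2 : PySem.List.slice t2 (some i) (some (i + 0)) = ([] : List Int) := by
        rw [PySem.List.slice_toNat t2 hi (by omega)]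
        rw [show (i + 0).toNat - i.toNat = 0 from by omega]
        simp
      simp only [e1, e2, List.contains_nil, Bool.false_and, Bool.and_false, Bool.not_false,
        Bool.and_true, Bool.false_and, if_false, Bool.not_true, ite_false]
      exact ihn (i + 1) ev (by omega)
    · rw [pvLoopA, if_neg hlt]

-- main loop correspondence: A's while-loop from i equals B's fold over range(i, limit)
theorem loopA_eq_fold (t1 t2 : List Int) (w : Int) (hw : 0 < w) :
    ∀ (fuel : Nat) (i : Int) (ev : List Int) (m : Bool),
    0 ≤ i → fuel = ((t1.length : Int) - w - i).toNat →
    pvLoopA t1 t2 w fuel i m ev =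
      ((PySem.List.pyRange i ((t1.length : Int) - w) 1).foldl
        (fun (st : List Int × Bool) j =>
          ((if (decide ((pvPrefix t1).getD (j + w).toNat 0 - (pvPrefix t1).getD j.toNat 0 > 0)
                && decide ((pvPrefix t2).getD (min (j + w) ((t2.length : Int))).toNat 0
                            - (pvPrefix t2).getD (min j ((t2.length : Int))).toNat 0 > 0)) && !st.2
              then st.1 ++ [j] else st.1),
            decide ((pvPrefix t1).getD (j + w).toNat 0 - (pvPrefix t1).getD j.toNat 0 > 0)
              && decide ((pvPrefix t2).getD (min (j + w) ((t2.length : Int))).toNat 0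
                          - (pvPrefix t2).getD (min j ((t2.length : Int))).toNat 0 > 0)))
        (ev, m)).1 := by
  intro fuel
  induction fuel with
  | zero =>
    intro i ev m hi hf
    rw [PySem.List.pyRange_one_eq_nil (by omega)]
    rfl
  | succ n ihn =>
    intro i ev m hi hf
    have hlt : i < (t1.length : Int) - w := by omega
    rw [pvLoopA, if_pos hlt]
    rw [PySem.List.pyRange_one_cons hlt, List.foldl_cons]
    have e1 := contains_eq_prefix' t1 i w hi (by omega) (by omega)
    have e2 := contains_eq_prefix t2 i w hi (by omega)
    simp only [e1, e2]
    set D1 := decide ((pvPrefix t1).getD (i + w).toNat 0 - (pvPrefix t1).getD i.toNat 0 > 0) with hD1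
    set D2 := decide ((pvPrefix t2).getD (min (i + w) ((t2.length : Int))).toNat 0
                       - (pvPrefix t2).getD (min i ((t2.length : Int))).toNat 0 > 0) with hD2
    split_ifs with h1 h2
    · rw [show (D1 && D2) = true from ((Bool.and_eq_true _ _).mp h1).1]
      exact ihn (i + 1) (ev ++ [i]) true (by omega) (by omega)
    · have hD : (D1 && D2) = false := by
        cases hc : (D1 && D2)
        · rfl
        · rw [hc] at h2; simp at h2
      rw [hD]
      exact ihn (i + 1) ev false (by omega) (by omega)
    · have hD : (D1 && D2) = m := by
        cases hc : (D1 && D2)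
        · cases hmv : m
          · rfl
          · rw [hc, hmv] at h2; simp at h2
        · cases hmv : m
          · rw [hc, hmv] at h1; simp at h1
          · rfl
      rw [hD]
      exact ihn (i + 1) ev m (by omega) (by omega)

-- ===== VERDICT (by name: the statement is the Claim_ definition above) =====
theorem find_trial_events_spec : Claim_equal_find_trial_events := by
  intro t1 t2 w _dom hpre
  show find_trial_events t1 t2 w = find_trial_events_alt t1 t2 w
  unfold find_trial_events find_trial_events_alt
  simp only []
  split_ifs with hg
  · -- guard: w ≤ 0 (hence w = 0 under Pre_) or the loop bound is already ≤ 0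
    simp only [Bool.or_eq_true, decide_eq_true_eq] at hg
    rcases hg with hg | hg
    · have hw0 : w = 0 := le_antisymm hg hpre
      subst hw0
      exact loopA_empty_window t1 t2 ((t1.length : Int) - 0).toNat 0 [] (by omega)
    · rw [show ((t1.length : Int) - w).toNat = 0 from by omega]
      rfl
  · simp only [Bool.or_eq_true, decide_eq_true_eq, not_or, not_le] at hg
    exact loopA_eq_fold t1 t2 w hg.1 ((t1.length : Int) - w).toNat 0 [] false (by omega) (by omega)
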